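-- pv_equiv track=rewrite | github.com/Azure-Samples/maf-sk-context-migration | src/agent_conversation/maf.py | _summarise_forward_staffing
-- ===== SOURCE A (Python) =====
-- from typing import Any, Dict, List
--
-- def _summarise_forward_staffing(schedule: Dict[str, Any], updates: Dict[str, Any], horizon: int) -> str:
--     staff_entries = schedule.get("staff_schedule", [])
--     updates_entries = updates.get("staff_updates", [])
--     if not staff_entries:
--         return "Staffing schedule is empty; please verify the dataset."
--
--     horizon_dates: Dict[str, int] = {}
--     for entry in staff_entries:
--         horizon_dates.setdefault(entry.get("date"), 0)
--         horizon_dates[entry.get("date")] += 1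
--     sorted_dates = sorted(horizon_dates)[:horizon]
--     lines: List[str] = [
--         "Constraints: max 10 hours/day, max 8 consecutive hours, max 5 consecutive days",
--         "Upcoming staffing snapshot:",
--     ]
--     for day in sorted_dates:
--         day_staff = [entry for entry in staff_entries if entry.get("date") == day]
--         roles = {entry.get("role") for entry in day_staff}
--         lines.append(f"- {day}: {len(day_staff)} assignments covering roles {sorted(roles)}")
--     flagged_updates = [update for update in updates_entries if update.get("update_type", "").lower() in {"absence", "shift change"}]
--     if flagged_updates:
--         lines.append("Recent updates to consider:")
--         for update in flagged_updates[:5]: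
--             lines.append(
--                 f"  * {update.get('date')} - {update.get('name')}: {update.get('update_type')} ({update.get('details')})"
--             )
--     return "\n".join(lines)
-- ===== SOURCE B (Python) =====
-- from typing import Any, Dict, List
--
-- def _summarise_forward_staffing(schedule: Dict[str, Any], updates: Dict[str, Any], horizon: int) -> str:
--     staff_entries = schedule.get("staff_schedule", [])
--     if not staff_entries:
--         return "Staffing schedule is empty; please verify the dataset."
--
--     # single pass: group count and role-set per date
--     groups: Dict[Any, Any] = {}
--     for entry in staff_entries:
--         d = entry.get("date")
--         cnt, roles = groups.get(d, (0, set()))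
--         roles.add(entry.get("role"))
--         groups[d] = (cnt + 1, roles)
--
--     lines: List[str] = [
--         "Constraints: max 10 hours/day, max 8 consecutive hours, max 5 consecutive days",
--         "Upcoming staffing snapshot:",
--     ]
--     for day in sorted(groups)[:horizon]:
--         cnt, roles = groups[day]
--         lines.append(f"- {day}: {cnt} assignments covering roles {sorted(roles)}")
--
--     # single pass over updates with early exit after 5 shown
--     shown = 0
--     for update in updates.get("staff_updates", []):
--         if update.get("update_type", "").lower() in {"absence", "shift change"}:
--             if shown == 0:
--                 lines.append("Recent updates to consider:")
--             if shown == 5: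
--                 break
--             lines.append(
--                 f"  * {update.get('date')} - {update.get('name')}: {update.get('update_type')} ({update.get('details')})"
--             )
--             shown += 1
--     return "\n".join(lines)
-- ===== Notes on version B (the rewrite author's own statement) =====
-- stated objective: alternative
-- what changed: B groups staff entries in one pass into a dict of per-date (count, role-set) pairs instead of rescanning the whole staff list for every selected date, and streams the updates with an early-exit loop instead of materialising the full flagged-updates list.
import Mathlib
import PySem

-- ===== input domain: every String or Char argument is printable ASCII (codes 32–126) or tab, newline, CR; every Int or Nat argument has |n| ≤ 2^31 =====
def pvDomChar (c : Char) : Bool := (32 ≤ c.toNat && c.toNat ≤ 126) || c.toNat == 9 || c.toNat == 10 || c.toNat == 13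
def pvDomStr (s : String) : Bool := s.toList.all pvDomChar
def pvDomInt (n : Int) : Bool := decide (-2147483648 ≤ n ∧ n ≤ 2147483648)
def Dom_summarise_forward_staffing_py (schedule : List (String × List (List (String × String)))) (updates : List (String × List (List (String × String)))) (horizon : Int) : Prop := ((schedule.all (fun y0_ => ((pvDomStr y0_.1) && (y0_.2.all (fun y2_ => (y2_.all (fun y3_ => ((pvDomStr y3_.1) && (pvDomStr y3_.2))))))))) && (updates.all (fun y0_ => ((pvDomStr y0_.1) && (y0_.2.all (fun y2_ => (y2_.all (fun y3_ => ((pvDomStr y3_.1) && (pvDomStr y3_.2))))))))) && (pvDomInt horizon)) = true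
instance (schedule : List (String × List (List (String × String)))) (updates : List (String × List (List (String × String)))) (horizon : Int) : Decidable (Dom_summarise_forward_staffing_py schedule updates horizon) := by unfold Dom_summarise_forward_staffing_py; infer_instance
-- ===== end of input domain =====

-- B replaces A's per-date rescan of the whole staff list (and the flagged-updates intermediate list) by one
-- grouping pass over the entries plus an early-exit loop over the updates; equivalence of the RETURN value is proved.

-- shared rendering helpers (identical source text in both Pythons: dict lookup, f-string of an optional value,
-- Python repr of a string / of a list — exact on the printable-ASCII + tab/newline/CR domain)
def pvLookup (e : List (String × String)) (k : String) : Option String := List.lookup k e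
def pvDate (e : List (String × String)) : Option String := pvLookup e "date"
def pvRole (e : List (String × String)) : Option String := pvLookup e "role"
def pvShow : Option String → String
  | none => "None"
  | some s => s
def pvReprChar (q : Char) (c : Char) : List Char :=
  if c = '\\' then ['\\', '\\']
  else if c = q then ['\\', q]
  else if c = '\n' then ['\\', 'n']
  else if c = '\r' then ['\\', 'r']
  else if c = '\t' then ['\\', 't']
  else [c]
def pvReprStr (s : String) : String :=
  let cs := s.toList
  let q : Char := if cs.contains '\'' && !(cs.contains '"') then '"' else '\''
  String.ofList (q :: (cs.flatMap (pvReprChar q)) ++ [q])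
def pvReprElem : Option String → String
  | none => "None"
  | some s => pvReprStr s
def pvReprList (xs : List (Option String)) : String :=
  "[" ++ PySem.Str.join ", " (xs.map pvReprElem) ++ "]"
-- Python sorts Option values directly and RAISES when None meets a string (excluded by Pre_ below);
-- on the admitted inputs (all-some, or a single element) this key gives exactly Python's order.
def pvKey (o : Option String) : List Char := (o.getD "").toList
def pvFlag (u : List (String × String)) : Bool :=
  let t := PySem.Str.lower ((pvLookup u "update_type").getD "")
  t == "absence" || t == "shift change"
def pvUpdLine (u : List (String × String)) : String :=
  "  * " ++ pvShow (pvLookup u "date") ++ " - " ++ pvShow (pvLookup u "name") ++ ": " ++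
    pvShow (pvLookup u "update_type") ++ " (" ++ pvShow (pvLookup u "details") ++ ")"
def pvConst1 : String := "Constraints: max 10 hours/day, max 8 consecutive hours, max 5 consecutive days"
def pvConst2 : String := "Upcoming staffing snapshot:"
def pvHdr : String := "Recent updates to consider:"

-- ===== PORT A =====
def pvAStep (d : PySem.Dict (Option String) Int) (e : List (String × String)) : PySem.Dict (Option String) Int :=
  let d := d.setdefault (pvDate e) 0
  d.insert (pvDate e) (d.getD (pvDate e) 0 + 1)

def summarise_forward_staffing_py (schedule : List (String × List (List (String × String)))) (updates : List (String × List (List (String × String)))) (horizon : Int) : String :=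
  let staff_entries := (List.lookup "staff_schedule" schedule).getD []
  let updates_entries := (List.lookup "staff_updates" updates).getD []
  if staff_entries.isEmpty then "Staffing schedule is empty; please verify the dataset."
  else
    let horizon_dates := staff_entries.foldl pvAStep PySem.Dict.empty
    let sorted_dates := PySem.List.slice (PySem.List.sorted horizon_dates.keys pvKey false) none (some horizon)
    let lines : List String := [pvConst1, pvConst2]
    let lines := sorted_dates.foldl (fun ls day =>
      let day_staff := staff_entries.filter (fun e => pvDate e == day)
      let roles : PySem.Set (Option String) := PySem.Set.ofList (day_staff.map pvRole)
      ls ++ ["- " ++ pvShow day ++ ": " ++ PySem.Int.toStr (PySem.List.len day_staff) ++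
             " assignments covering roles " ++ pvReprList (PySem.List.sorted roles pvKey false)]) lines
    let flagged := updates_entries.filter pvFlag
    let lines := if !flagged.isEmpty then
        (PySem.List.slice flagged none (some 5)).foldl (fun ls u => ls ++ [pvUpdLine u]) (lines ++ [pvHdr])
      else lines
    PySem.Str.join "\n" lines

-- ===== PORT B =====
def pvBStep (d : PySem.Dict (Option String) (Int × PySem.Set (Option String))) (e : List (String × String)) : PySem.Dict (Option String) (Int × PySem.Set (Option String)) :=
  let g := d.getD (pvDate e) (0, PySem.Set.empty)
  d.insert (pvDate e) (g.1 + 1, PySem.Set.add g.2 (pvRole e))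

def pvBUpdLoop (lines : List String) (us : List (List (String × String))) (shown : Int) : List String :=
  match us with
  | [] => lines
  | u :: rest =>
    if pvFlag u then
      let lines := if shown == 0 then lines ++ [pvHdr] else lines
      if shown == 5 then lines
      else pvBUpdLoop (lines ++ [pvUpdLine u]) rest (shown + 1)
    else pvBUpdLoop lines rest shown

def summarise_forward_staffing_py_alt (schedule : List (String × List (List (String × String)))) (updates : List (String × List (List (String × String)))) (horizon : Int) : String :=
  let staff_entries := (List.lookup "staff_schedule" schedule).getD []
  if staff_entries.isEmpty then "Staffing schedule is empty; please verify the dataset."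
  else
    let groups := staff_entries.foldl pvBStep PySem.Dict.empty
    let lines : List String := [pvConst1, pvConst2]
    let lines := (PySem.List.slice (PySem.List.sorted groups.keys pvKey false) none (some horizon)).foldl
      (fun ls day =>
        let g := groups.getD day (0, PySem.Set.empty)
        ls ++ ["- " ++ pvShow day ++ ": " ++ PySem.Int.toStr g.1 ++
               " assignments covering roles " ++ pvReprList (PySem.List.sorted g.2 pvKey false)]) lines
    PySem.Str.join "\n" (pvBUpdLoop lines ((List.lookup "staff_updates" updates).getD []) 0)

-- ===== PRECONDITION & SPEC =====
-- Python's sorted() raises TypeError whenever a None (from a missing "date"/"role" key) is compared with a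
-- string; Pre_ excludes exactly those inputs: a None among ≥ 2 distinct dates, or, on a date selected for the
-- snapshot, a None among ≥ 2 distinct roles of that date.  (Both A and B raise there.)
def pvNoMix (vals : List (Option String)) : Prop :=
  none ∈ PySem.List.dedup vals → (PySem.List.dedup vals).length = 1
def pvStaffOf (schedule : List (String × List (List (String × String)))) : List (List (String × String)) :=
  (List.lookup "staff_schedule" schedule).getD []
def pvSelected (staff : List (List (String × String))) (horizon : Int) : List (Option String) :=
  PySem.List.slice (PySem.List.sorted (PySem.List.dedup (staff.map pvDate)) pvKey false) none (some horizon)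
def Pre_summarise_forward_staffing_py (schedule : List (String × List (List (String × String)))) (updates : List (String × List (List (String × String)))) (horizon : Int) : Prop :=
  pvNoMix ((pvStaffOf schedule).map pvDate) ∧
  ∀ day ∈ pvSelected (pvStaffOf schedule) horizon,
    pvNoMix (((pvStaffOf schedule).filter (fun e => pvDate e == day)).map pvRole)
instance (schedule : List (String × List (List (String × String)))) (updates : List (String × List (List (String × String)))) (horizon : Int) : Decidable (Pre_summarise_forward_staffing_py schedule updates horizon) := by unfold Pre_summarise_forward_staffing_py pvNoMix; infer_instance

def pvWitness_summarise_forward_staffing_py : (List (String × List (List (String × String)))) × (List (String × List (List (String × String)))) × Int :=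
  ([("staff_schedule", [[("date", "2025-06-01"), ("role", "nurse")], [("date", "2025-06-02"), ("role", "cook")]])],
   [("staff_updates", [[("date", "2025-06-01"), ("name", "Ana"), ("update_type", "Absence"), ("details", "sick")]])], 3)

def Spec_summarise_forward_staffing_py (schedule : List (String × List (List (String × String)))) (updates : List (String × List (List (String × String)))) (horizon : Int) (out : String) : Prop := out = summarise_forward_staffing_py_alt schedule updates horizon
instance (schedule : List (String × List (List (String × String)))) (updates : List (String × List (List (String × String)))) (horizon : Int) (out : String) : Decidable (Spec_summarise_forward_staffing_py schedule updates horizon out) := by unfold Spec_summarise_forward_staffing_py; infer_instance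

-- ===== CLAIM (what is proved, stated in full; the proofs are below) =====
def Claim_equal_summarise_forward_staffing_py : Prop := ∀ (schedule : List (String × List (List (String × String)))) (updates : List (String × List (List (String × String)))) (horizon : Int), Dom_summarise_forward_staffing_py schedule updates horizon → Pre_summarise_forward_staffing_py schedule updates horizon → Spec_summarise_forward_staffing_py schedule updates horizon (summarise_forward_staffing_py schedule updates horizon)

-- ===== LEMMAS AND PROOFS =====

-- keys of A's counting fold
theorem pvAStep_keys (d : PySem.Dict (Option String) Int) (e : List (String × String)) :
    (pvAStep d e).keys = PySem.Set.add d.keys (pvDate e) := by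
  unfold pvAStep
  by_cases hc : d.contains (pvDate e) = true
  · rw [PySem.Dict.setdefault_of_contains _ _ hc, PySem.Dict.keys_insert_of_contains _ _ hc]
    simp [PySem.Set.add, PySem.Set.contains, ← PySem.Dict.contains_iff_mem_keys, hc]
  · rw [PySem.Dict.setdefault_of_not_contains _ _ (by simpa using hc)]
    rw [PySem.Dict.keys_insert_of_contains _ _ (by simp [PySem.Dict.contains_insert]),
        PySem.Dict.keys_insert_of_not_contains _ _ (by simpa using hc)]
    simp [PySem.Set.add, PySem.Set.contains, ← PySem.Dict.contains_iff_mem_keys, hc]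

theorem pvA_keys (l : List (List (String × String))) (d : PySem.Dict (Option String) Int) :
    (l.foldl pvAStep d).keys = PySem.Set.update d.keys (l.map pvDate) := by
  induction l generalizing d with
  | nil => simp [PySem.Set.update]
  | cons e rest ih => simp [List.foldl_cons, ih, pvAStep_keys, PySem.Set.update]

-- keys of B's grouping fold
theorem pvB_keys (l : List (List (String × String))) (d : PySem.Dict (Option String) (Int × PySem.Set (Option String))) :
    (l.foldl pvBStep d).keys = PySem.Set.update d.keys (l.map pvDate) := by
  have := PySem.Dict.keys_foldl_insert_key l pvDate
    (fun d e => ((d.getD (pvDate e) (0, PySem.Set.empty)).1 + 1,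
      PySem.Set.add (d.getD (pvDate e) (0, PySem.Set.empty)).2 (pvRole e))) d
  simpa [pvBStep] using this

-- content of B's grouping fold: per key, the running pair is the count and role set of the matching entries
theorem pvB_getD (l : List (List (String × String))) (d : PySem.Dict (Option String) (Int × PySem.Set (Option String))) (k : Option String) :
    (l.foldl pvBStep d).getD k (0, PySem.Set.empty) =
      ((d.getD k (0, PySem.Set.empty)).1 + ((l.filter (fun e => pvDate e == k)).length : Int),
       PySem.Set.update (d.getD k (0, PySem.Set.empty)).2 ((l.filter (fun e => pvDate e == k)).map pvRole)) := by
  induction l generalizing d with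
  | nil => simp [PySem.Set.update]
  | cons e rest ih =>
    rw [List.foldl_cons, ih]
    by_cases he : pvDate e = k
    · subst he
      simp [pvBStep, PySem.Dict.getD_insert, PySem.Set.update]
      omega
    · simp [pvBStep, PySem.Dict.getD_insert, he, Ne.symm he]

-- B's update loop, characterised: header on the first flagged update, then the first 5 - n flagged items
theorem pvBUpdLoop_eq (us : List (List (String × String))) (lines : List String) (n : Nat) (hn : n ≤ 5) :
    pvBUpdLoop lines us (n : Int) =
      lines ++ (if us.any pvFlag ∧ n = 0 then [pvHdr] else []) ++
        (((us.filter pvFlag).take (5 - n)).map pvUpdLine) := by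
  induction us generalizing lines n with
  | nil => simp [pvBUpdLoop]
  | cons u rest ih =>
    by_cases hf : pvFlag u
    · rcases Nat.eq_or_lt_of_le hn with h5 | h5
      · subst h5
        simp [pvBUpdLoop, hf]
      · have h0 : ((n : Int) == 5) = false := by simp; omega
        have hrec : ((n : Int) + 1) = ((n + 1 : Nat) : Int) := by push_cast; ring
        rw [pvBUpdLoop, if_pos hf]
        simp only [h0, Bool.false_eq_true, if_false, hrec]
        rw [ih _ (n + 1) (by omega)]
        by_cases hn0 : n = 0
        · subst hn0
          simp [List.filter_cons, hf, List.take_succ_cons, Nat.sub_add_eq]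
        · have : ((0:Int) == (n:Int)) = false := by simp; omega
          simp [hf, hn0, beq_iff_eq]
          rw [show 5 - n = (4 - n) + 1 by omega, List.take_succ_cons]
    · rw [pvBUpdLoop, if_neg hf]
      rw [ih _ n hn]
      simp [hf]

-- ===== VERDICT (by name: the statement is the Claim_ definition above) =====
theorem summarise_forward_staffing_py_spec : Claim_equal_summarise_forward_staffing_py := by
  intro schedule updates horizon _ _
  unfold Spec_summarise_forward_staffing_py
  unfold summarise_forward_staffing_py summarise_forward_staffing_py_alt
  by_cases hE : ((List.lookup "staff_schedule" schedule).getD []).isEmpty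
  · simp only [hE, if_true]
  · simp only [hE, Bool.false_eq_true, if_false]
    set staff := (List.lookup "staff_schedule" schedule).getD [] with hstaff
    -- identical date keys for both dictionaries
    have hkeys : (staff.foldl pvAStep PySem.Dict.empty).keys
        = (staff.foldl pvBStep PySem.Dict.empty).keys := by
      rw [pvA_keys, pvB_keys]; rfl
    -- the snapshot lines agree day by day
    have hlines : ∀ (init : List String),
        (PySem.List.slice (PySem.List.sorted (staff.foldl pvAStep PySem.Dict.empty).keys pvKey false) none (some horizon)).foldl
          (fun ls day =>
            ls ++ ["- " ++ pvShow day ++ ": " ++ PySem.Int.toStr (PySem.List.len (staff.filter (fun e => pvDate e == day))) ++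
                   " assignments covering roles " ++
                   pvReprList (PySem.List.sorted (PySem.Set.ofList ((staff.filter (fun e => pvDate e == day)).map pvRole)) pvKey false)]) init
        = (PySem.List.slice (PySem.List.sorted (staff.foldl pvBStep PySem.Dict.empty).keys pvKey false) none (some horizon)).foldl
          (fun ls day =>
            ls ++ ["- " ++ pvShow day ++ ": " ++ PySem.Int.toStr ((staff.foldl pvBStep PySem.Dict.empty).getD day (0, PySem.Set.empty)).1 ++
                   " assignments covering roles " ++
                   pvReprList (PySem.List.sorted ((staff.foldl pvBStep PySem.Dict.empty).getD day (0, PySem.Set.empty)).2 pvKey false)]) init := by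
      intro init
      rw [hkeys, PySem.List.foldl_append_singleton_eq_map, PySem.List.foldl_append_singleton_eq_map]
      congr 1
      apply List.map_congr_left
      intro day _
      rw [pvB_getD]
      simp [PySem.Set.update_nil_left]
    have hupd : ∀ (ls : List String),
        (if !((((List.lookup "staff_updates" updates).getD []).filter pvFlag).isEmpty) then
          (PySem.List.slice (((List.lookup "staff_updates" updates).getD []).filter pvFlag) none (some 5)).foldl
            (fun ls u => ls ++ [pvUpdLine u]) (ls ++ [pvHdr])
         else ls)
        = pvBUpdLoop ls ((List.lookup "staff_updates" updates).getD []) 0 := by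
      intro ls
      have := pvBUpdLoop_eq ((List.lookup "staff_updates" updates).getD []) ls 0 (by omega)
      rw [show ((0 : Nat) : Int) = (0 : Int) by norm_num] at this
      rw [this]
      by_cases hfl : (((List.lookup "staff_updates" updates).getD []).filter pvFlag).isEmpty
      · have hany : ((List.lookup "staff_updates" updates).getD []).any pvFlag = false := by
          rw [List.isEmpty_iff, List.filter_eq_nil_iff] at hfl
          simp only [List.any_eq_false]
          exact fun x hx => by simpa using hfl x hx
        simp [hfl, hany, List.isEmpty_iff.mp hfl]
      · have hne : (((List.lookup "staff_updates" updates).getD []).filter pvFlag) ≠ [] := by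
          simpa [List.isEmpty_iff] using hfl
        obtain ⟨x, hx⟩ := List.exists_mem_of_ne_nil _ hne
        have hany : ((List.lookup "staff_updates" updates).getD []).any pvFlag = true :=
          List.any_eq_true.mpr ⟨x, List.mem_of_mem_filter hx, List.of_mem_filter hx⟩
        rw [if_pos (by simpa using hfl)]
        rw [PySem.List.slice_to _ (by norm_num), PySem.List.foldl_append_singleton_eq_map]
        simp [hany]
    rw [hlines, hupd]
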